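-- pv_equiv track=rewrite | github.com/djotaku/adventofcode | 2016/Day_19/Python/solution.py | game_round
-- ===== SOURCE A (Python) =====
-- def game_round(elfs_and_presents: dict) -> (dict, bool):
--     """play one round of the white elephant game."""
--     elves_still_in_game = [key for key in elfs_and_presents.keys() if elfs_and_presents[key] is True]
--     if len(elves_still_in_game) == 1:
--         return elfs_and_presents, False
--     for index, this_elf in enumerate(elves_still_in_game):
--         if elfs_and_presents[this_elf]:
--             if this_elf != elves_still_in_game[-1]:
--                 elfs_and_presents[elves_still_in_game[index+1]] = False
--             else:
--                 elfs_and_presents[elves_still_in_game[0]] = False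
--     return elfs_and_presents, True
-- ===== SOURCE B (Python) =====
-- def game_round(elfs_and_presents: dict) -> (dict, bool):
--     """play one round of the white elephant game (marks the same dict in place)."""
--     active = [k for k, v in elfs_and_presents.items() if v is True]
--     if len(active) == 1:
--         return elfs_and_presents, False
--     victims = active[1::2]
--     if len(active) % 2 == 1:
--         victims.append(active[0])
--     for elf in victims:
--         elfs_and_presents[elf] = False
--     return elfs_and_presents, True
-- ===== Notes on version B (the rewrite author's own statement) =====
-- stated objective: idiomatic
-- what changed: B computes the victim list directly (the slice active[1::2] of every second active elf, plus the wrap-around first elf when the active count is odd) and marks it in one loop, instead of A's enumerate pass over all active elves that re-reads the mutated dict to decide per elf whether it still eliminates.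
import Mathlib
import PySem

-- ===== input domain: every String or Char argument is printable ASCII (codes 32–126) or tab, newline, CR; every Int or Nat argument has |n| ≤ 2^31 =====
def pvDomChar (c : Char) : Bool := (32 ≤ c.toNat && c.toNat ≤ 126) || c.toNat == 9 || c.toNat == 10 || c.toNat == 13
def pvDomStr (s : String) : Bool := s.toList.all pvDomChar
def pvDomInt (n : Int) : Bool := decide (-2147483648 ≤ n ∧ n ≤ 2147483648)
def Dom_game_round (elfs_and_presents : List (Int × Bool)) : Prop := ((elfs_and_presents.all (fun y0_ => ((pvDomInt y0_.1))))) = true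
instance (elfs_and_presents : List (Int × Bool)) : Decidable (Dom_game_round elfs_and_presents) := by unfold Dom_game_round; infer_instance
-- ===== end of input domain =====

-- B computes the victims directly (slice active[1::2] plus the wrap-around first elf for an odd
-- active count) instead of A's enumerate pass re-reading the mutated dict; both mutate the dict in
-- place in Python (proved here: equal return values).

-- ===== PORT A =====
def game_round (elfs_and_presents : List (Int × Bool)) : (List (Int × Bool)) × Bool :=
  let d0 : PySem.Dict Int Bool := PySem.Dict.mk elfs_and_presents
  -- [key for key in elfs_and_presents.keys() if elfs_and_presents[key] is True]
  -- (keys exist, so d[key] never raises: getD's default is never used)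
  let elves_still_in_game := (PySem.Dict.keys d0).filter (fun k => PySem.Dict.getD d0 k false)
  if elves_still_in_game.length == 1 then (d0.items, false)
  else
    let dfin := (PySem.List.enumerate elves_still_in_game).foldl
      (fun d (p : Int × Int) =>
        if d.getD p.2 false then
          if p.2 != PySem.List.pyGetD elves_still_in_game (-1) 0 then
            -- index+1 is in range here (this_elf is not the last elf and keys are unique),
            -- so pyGetD's default is never used
            d.insert (PySem.List.pyGetD elves_still_in_game (p.1 + 1) 0) false
          else
            d.insert (PySem.List.pyGetD elves_still_in_game 0 0) false
        else d) d0
    (dfin.items, true)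

-- ===== PORT B =====
def game_round_alt (elfs_and_presents : List (Int × Bool)) : (List (Int × Bool)) × Bool :=
  let d0 : PySem.Dict Int Bool := PySem.Dict.mk elfs_and_presents
  -- [k for k, v in elfs_and_presents.items() if v is True]
  let active := (d0.items.filter (fun p => p.2)).map Prod.fst
  if active.length == 1 then (d0.items, false)
  else
    -- active[1::2]  (step 2 ≠ 0, so slice? never returns none)
    let victims := (PySem.List.slice? active (some 1) none 2).getD []
    let victims := victims ++ (if active.length % 2 == 1 then [PySem.List.pyGetD active 0 0] else [])
    ((victims.foldl (fun d k => PySem.Dict.insert d k false) d0).items, true)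

-- ===== PRECONDITION & SPEC =====
-- Pre_ excludes association lists with a duplicated key: they do not encode any Python dict
-- (A's argument is a dict, whose keys are unique), so the ports' behaviour there is nobody's.
def Pre_game_round (elfs_and_presents : List (Int × Bool)) : Prop :=
  (elfs_and_presents.map Prod.fst).Nodup
instance (elfs_and_presents : List (Int × Bool)) : Decidable (Pre_game_round elfs_and_presents) := by
  unfold Pre_game_round; infer_instance
def pvWitness_game_round : (List (Int × Bool)) := [(1, true), (2, true), (3, false), (4, true)]

def Spec_game_round (elfs_and_presents : List (Int × Bool)) (out : (List (Int × Bool)) × Bool) : Prop := out = game_round_alt elfs_and_presents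
instance (elfs_and_presents : List (Int × Bool)) (out : (List (Int × Bool)) × Bool) : Decidable (Spec_game_round elfs_and_presents out) := by unfold Spec_game_round; infer_instance

-- ===== CLAIM (what is proved, stated in full; the proofs are below) =====
def Claim_equal_game_round : Prop := ∀ (elfs_and_presents : List (Int × Bool)), Dom_game_round elfs_and_presents → Pre_game_round elfs_and_presents → Spec_game_round elfs_and_presents (game_round elfs_and_presents)

-- ===== LEMMAS AND PROOFS =====

def stride2 {α : Type} : List α → List α
  | [] => []
  | [_] => []
  | _ :: b :: t => b :: stride2 t

lemma stride2_aux {α : Type} (t : List α) :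
    List.filterMap (fun x : Nat => t[(1 + 2 * (x:Int)).toNat]?) (List.range (t.length / 2))
      = stride2 t := by
  induction t using stride2.induct with
  | case1 => simp [stride2]
  | case2 a => simp [stride2]
  | case3 a b r ih =>
    have hlen : (a :: b :: r).length / 2 = r.length / 2 + 1 := by simp; omega
    rw [hlen, List.range_succ_eq_map, List.filterMap_cons, List.filterMap_map]
    have h0 : (a :: b :: r)[((1 : Int) + 2 * ((0:Nat):Int)).toNat]? = some b := by norm_num
    rw [h0]
    have hf : ∀ x : Nat, (a :: b :: r)[(1 + 2 * ((Nat.succ x : Nat):Int)).toNat]?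
        = r[(1 + 2 * (x:Int)).toNat]? := by
      intro x
      have : ((1 : Int) + 2 * ((Nat.succ x : Nat):Int)).toNat = (1 + 2 * (x:Int)).toNat + 2 := by
        push_cast; omega
      rw [this]
      simp
    simp only [Function.comp_def, hf]
    rw [stride2, ih]

lemma slice_one_two {α : Type} (l : List α) :
    PySem.List.slice? l (some 1) none 2 = some (stride2 l) := by
  match l with
  | [] => rfl
  | x :: xs =>
    simp only [PySem.List.slice?, PySem.List.sliceIndices]
    norm_num
    have hcnt : (if 0 < xs.length then (((xs.length : Int) + 2 - 1) / 2).toNat else 0)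
        = (x :: xs).length / 2 := by
      split_ifs with h <;> simp <;> omega
    rw [hcnt]
    exact stride2_aux (x :: xs)

lemma active_eq (eps : List (Int × Bool)) (h : (eps.map Prod.fst).Nodup) :
    ((PySem.Dict.mk eps).keys.filter (fun k => PySem.Dict.getD (PySem.Dict.mk eps) k false))
      = (((PySem.Dict.mk eps).items.filter (fun p => p.2)).map Prod.fst) := by
  induction eps with
  | nil => rfl
  | cons p rest ih =>
    obtain ⟨k, v⟩ := p
    simp only [List.map_cons, List.nodup_cons] at h
    obtain ⟨hk, hrest⟩ := h
    have hitems : (PySem.Dict.mk ((k, v) :: rest)).items = (k, v) :: rest := rfl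
    have hkeys : (PySem.Dict.mk ((k, v) :: rest)).keys = k :: rest.map Prod.fst := by
      simp [PySem.Dict.keys]
    have hself : PySem.Dict.getD (PySem.Dict.mk ((k, v) :: rest)) k false = v := by
      simp [PySem.Dict.getD_eq_get?_getD, PySem.Dict.get?_mk_cons]
    have hother : ∀ x ∈ rest.map Prod.fst,
        PySem.Dict.getD (PySem.Dict.mk ((k, v) :: rest)) x false
          = PySem.Dict.getD (PySem.Dict.mk rest) x false := by
      intro x hx
      have hne : ¬ (k == x) := by
        simp only [beq_iff_eq]
        rintro rfl; exact hk hx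
      simp [PySem.Dict.getD_eq_get?_getD, PySem.Dict.get?_mk_cons, hne]
    have hkeys' : (PySem.Dict.mk rest).keys = rest.map Prod.fst := rfl
    have hitems' : (PySem.Dict.mk rest).items = rest := rfl
    rw [hkeys', hitems'] at ih
    rw [hkeys, hitems, List.filter_cons, List.filter_cons]
    rw [List.filter_congr hother, ih hrest, hself]
    cases v <;> simp

lemma loopA_gen (elves : List Int) (hnd : elves.Nodup)
    (s : List Int) (i : Nat) (hs : elves.drop i = s) (hi : i % 2 = 0)
    (d : PySem.Dict Int Bool) (hall : ∀ a ∈ s, d.getD a false = true) :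
    (PySem.List.enumerate s (i : Int)).foldl
      (fun d (p : Int × Int) =>
        if d.getD p.2 false then
          if p.2 != PySem.List.pyGetD elves (-1) 0 then
            d.insert (PySem.List.pyGetD elves (p.1 + 1) 0) false
          else
            d.insert (PySem.List.pyGetD elves 0 0) false
        else d) d
    = (stride2 s ++ (if (i + s.length) % 2 == 1 then [PySem.List.pyGetD elves 0 0] else [])).foldl
        (fun d k => PySem.Dict.insert d k false) d := by
  induction s using stride2.induct generalizing i d with
  | case1 =>
    have h0 : i % 2 = 0 := hi
    simp [PySem.List.enumerate, stride2, h0]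
  | case2 a =>
    -- last elf at an even index: the wrap-around insert of elves[0]
    have hsplit : elves = List.take i elves ++ [a] := by
      conv_lhs => rw [← List.take_append_drop i elves, hs]
    have hlastval : PySem.List.pyGetD elves (-1) (0 : Int) = a := by
      rw [hsplit]; exact PySem.List.pyGetD_neg_one_append_singleton ..
    have hcond : (a != PySem.List.pyGetD elves (-1) 0) = false := by
      rw [hlastval]; simp
    have hwrap : (i + [a].length) % 2 = 1 := by simp; omega
    simp only [PySem.List.enumerate_cons, PySem.List.enumerate_nil, List.foldl_cons,
      List.foldl_nil, hall a (by simp), if_true, hcond, stride2, hwrap,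
      List.nil_append]
    simp
  | case3 a b t ih =>
    have hsub : (a :: b :: t).Sublist elves := hs ▸ List.drop_sublist i elves
    have hnds : (a :: b :: t).Nodup := hsub.nodup hnd
    -- a is not the last element of elves
    have hsplit : elves = (List.take i elves ++ (a :: b :: t).dropLast)
        ++ [(a :: b :: t).getLast (by simp)] := by
      conv_lhs => rw [← List.take_append_drop i elves, hs]
      rw [List.append_assoc, List.dropLast_append_getLast (by simp : (a :: b :: t) ≠ [])]
    have hlastval : PySem.List.pyGetD elves (-1) (0 : Int) = (a :: b :: t).getLast (by simp) := by
      rw [hsplit]; exact PySem.List.pyGetD_neg_one_append_singleton ..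
    have hlast_mem : (a :: b :: t).getLast (by simp) ∈ b :: t := by
      rw [List.getLast_cons (by simp)]
      exact List.getLast_mem _
    have hane : a ≠ (a :: b :: t).getLast (by simp) := by
      intro h
      exact (List.nodup_cons.mp hnds).1 (h ▸ hlast_mem)
    have hcond : (a != PySem.List.pyGetD elves (-1) 0) = true := by
      rw [hlastval]; simpa using hane
    -- elves[i+1] = b
    have hb : PySem.List.pyGetD elves ((i : Int) + 1) 0 = b := by
      have h1 : elves[i + 1]? = some b := by
        rw [← List.getElem?_drop, hs]
        rfl
      have h2 : ((i : Int) + 1) = ((i + 1 : Nat) : Int) := by push_cast; ring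
      rw [h2, PySem.List.pyGetD_natCast, List.getD_eq_getElem?_getD, h1]
      rfl
    -- step for b is skipped
    have hskip : (d.insert b false).getD b false = false := PySem.Dict.getD_insert_self _ _ _ _
    have hrec := ih (i + 2)
      (by rw [← List.drop_drop, hs]; rfl)
      (by omega)
      (d.insert b false)
      (by
        intro c hc
        have hcb : c ≠ b := by
          intro h
          exact (List.nodup_cons.mp (List.nodup_cons.mp hnds).2).1 (h ▸ hc)
        rw [PySem.Dict.getD_insert_of_ne _ _ _ hcb]
        exact hall c (by simp [hc]))
    simp only [PySem.List.enumerate_cons, List.foldl_cons, hall a (by simp), if_true,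
      hcond, if_true, hb, hskip, Bool.false_eq_true, if_false] at hrec ⊢
    have hcast : ((i : Int) + 1 + 1) = ((i + 2 : Nat) : Int) := by push_cast; ring
    have harith : i + 2 + t.length = i + (t.length + 1 + 1) := by omega
    rw [harith] at hrec
    rw [hcast, hrec]
    simp only [stride2, List.cons_append, List.foldl_cons, List.length_cons]
    rfl

lemma game_round_eq_alt (eps : List (Int × Bool)) (hpre : (eps.map Prod.fst).Nodup) :
    game_round eps = game_round_alt eps := by
  simp only [game_round, game_round_alt]
  rw [← active_eq eps hpre]
  set d0 : PySem.Dict Int Bool := PySem.Dict.mk eps with hd0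
  set elves := (PySem.Dict.keys d0).filter (fun k => PySem.Dict.getD d0 k false) with helves
  by_cases h1 : elves.length == 1
  · simp [h1]
  · simp only [h1, Bool.false_eq_true, if_false]
    have hnd : elves.Nodup := by
      rw [helves]
      exact (List.Nodup.filter _ (by exact hpre))
    have hall : ∀ a ∈ elves, d0.getD a false = true := by
      intro a ha
      rw [helves] at ha
      exact (List.mem_filter.mp ha).2
    have hmain := loopA_gen elves hnd elves 0 rfl (by omega) d0 hall
    have h00 : ((0 : Nat) : Int) = 0 := rfl
    rw [h00] at hmain
    rw [hmain, slice_one_two]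
    simp only [Option.getD_some, Nat.zero_add]

-- ===== VERDICT (by name: the statement is the Claim_ definition above) =====
theorem game_round_spec : Claim_equal_game_round := by
  intro eps _ hpre
  unfold Spec_game_round
  exact game_round_eq_alt eps hpre
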